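-- pv_equiv track=rewrite | github.com/Katy-Bejar/Visualizator | alignment_algorithms/point_matrix.py | point_matrix
-- ===== SOURCE A (Python) =====
-- def point_matrix(seq1, seq2):
--     matrix = []
--     for i in range(len(seq1)):
--         row = []
--         for j in range(len(seq2)):
--             if seq1[i] == seq2[j]:
--                 row.append(1)
--             else:
--                 row.append(0)
--         matrix.append(row)
--     return matrix
-- ===== SOURCE B (Python) =====
-- def point_matrix(seq1, seq2):
--     index = {}
--     for j, c in enumerate(seq2):
--         index.setdefault(c, []).append(j)
--     n = len(seq2)
--     matrix = []
--     for c in seq1: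
--         row = [0] * n
--         for j in index.get(c, []):
--             row[j] = 1
--         matrix.append(row)
--     return matrix
-- ===== Notes on version B (the rewrite author's own statement) =====
-- stated objective: alternative
-- what changed: Replaces the per-cell equality comparison of the nested index loops by an inverted index over seq2 (char -> column positions) followed by a scatter of 1s into a zero row for each character of seq1.
import Mathlib
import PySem

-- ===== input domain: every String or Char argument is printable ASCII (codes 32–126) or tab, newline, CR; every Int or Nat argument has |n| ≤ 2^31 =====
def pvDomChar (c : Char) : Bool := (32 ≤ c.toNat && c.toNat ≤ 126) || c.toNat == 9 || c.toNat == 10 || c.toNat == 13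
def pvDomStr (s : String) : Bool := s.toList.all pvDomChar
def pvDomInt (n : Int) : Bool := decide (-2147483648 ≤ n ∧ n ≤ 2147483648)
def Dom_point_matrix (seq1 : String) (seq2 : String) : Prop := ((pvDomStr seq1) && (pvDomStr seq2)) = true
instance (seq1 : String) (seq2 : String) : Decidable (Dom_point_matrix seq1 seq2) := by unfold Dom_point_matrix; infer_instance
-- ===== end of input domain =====

-- B replaces A's per-cell comparison in nested index loops with an inverted index
-- (char -> column positions of seq2) plus a scatter of 1s into a fresh zero row per
-- character of seq1 (objective: alternative decomposition of the same work).

-- ===== PORT A =====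
-- 'seq1[i]' / 'seq2[j]' are read with pyGetD; the loop indices i, j come from
-- range(len(..)) so they are always in range and the default is never used (exact).
def point_matrix (seq1 : String) (seq2 : String) : List (List Int) :=
  (PySem.List.pyRange 0 (PySem.Str.len seq1) 1).foldl (fun matrix i =>
    matrix ++ [(PySem.List.pyRange 0 (PySem.Str.len seq2) 1).foldl (fun row j =>
      if PySem.List.pyGetD seq1.toList i ' ' = PySem.List.pyGetD seq2.toList j ' '
      then row ++ [(1 : Int)] else row ++ [(0 : Int)]) []]) []

-- ===== PORT B =====
-- index.setdefault(c, []).append(j) is Dict.modify c [] (· ++ [j]); row[j] = 1 is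
-- pySetD (j comes from enumerate, so 0 ≤ j < n and pySetD is exact for list.set).
def point_matrix_alt (seq1 : String) (seq2 : String) : List (List Int) :=
  let index : PySem.Dict Char (List Int) :=
    (PySem.List.enumerate seq2.toList 0).foldl
      (fun d p => d.modify p.2 [] (· ++ [p.1])) PySem.Dict.empty
  let n := seq2.toList.length
  seq1.toList.foldl (fun matrix c =>
    matrix ++ [(index.getD c []).foldl
      (fun row j => PySem.List.pySetD row j 1) (List.replicate n (0 : Int))]) []

-- ===== PRECONDITION & SPEC =====
def Spec_point_matrix (seq1 : String) (seq2 : String) (out : List (List Int)) : Prop := out = point_matrix_alt seq1 seq2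
instance (seq1 : String) (seq2 : String) (out : List (List Int)) : Decidable (Spec_point_matrix seq1 seq2 out) := by unfold Spec_point_matrix; infer_instance

-- ===== CLAIM (what is proved, stated in full; the proofs are below) =====
def Claim_equal_point_matrix : Prop := ∀ (seq1 : String) (seq2 : String), Dom_point_matrix seq1 seq2 → Spec_point_matrix seq1 seq2 (point_matrix seq1 seq2)

-- ===== LEMMAS AND PROOFS =====

-- the canonical value both ports are shown to equal
def pmCanon (l1 l2 : List Char) : List (List Int) :=
  l1.map (fun c => l2.map (fun d => if c = d then (1 : Int) else 0))

-- A's inner loop builds the comparison row for the character c = seq1[i]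
lemma pmA_row (l2 : List Char) (c : Char) :
    (PySem.List.pyRange 0 (l2.length : Int) 1).foldl (fun row j =>
      if c = PySem.List.pyGetD l2 j ' ' then row ++ [(1 : Int)] else row ++ [(0 : Int)]) []
      = l2.map (fun d => if c = d then (1 : Int) else 0) := by
  have h1 : ∀ (row : List Int) (j : Int),
      (if c = PySem.List.pyGetD l2 j ' ' then row ++ [(1:Int)] else row ++ [(0:Int)])
        = row ++ [if c = PySem.List.pyGetD l2 j ' ' then (1:Int) else 0] := by
    intro row j; split <;> rfl
  simp only [h1]
  rw [PySem.List.foldl_append_singleton_eq_map]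
  conv_rhs => rw [← PySem.List.map_pyGetD_pyRange_zero' l2 ' ']
  rw [List.map_map]
  rfl

lemma pmA_eq_canon (seq1 seq2 : String) :
    point_matrix seq1 seq2 = pmCanon seq1.toList seq2.toList := by
  unfold point_matrix pmCanon
  simp only [PySem.Str.len_eq]
  have h1 : ∀ (m : List (List Int)) (i : Int),
      (fun matrix i =>
        matrix ++ [(PySem.List.pyRange 0 ((seq2.toList.length : Int)) 1).foldl (fun row j =>
          if PySem.List.pyGetD seq1.toList i ' ' = PySem.List.pyGetD seq2.toList j ' '
          then row ++ [(1 : Int)] else row ++ [(0 : Int)]) []]) m i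
        = m ++ [seq2.toList.map (fun d => if PySem.List.pyGetD seq1.toList i ' ' = d then (1:Int) else 0)] := by
    intro m i; simp only [pmA_row]
  simp only [h1]
  rw [PySem.List.foldl_append_singleton_eq_map]
  conv_rhs => rw [← PySem.List.map_pyGetD_pyRange_zero' seq1.toList ' ']
  rw [List.map_map]
  rfl

-- the column-index list of character c in l2 (the value B's inverted index holds at c)
def pmIdx (l2 : List Char) (c : Char) : List Int :=
  ((PySem.List.enumerate l2 0).filter (fun p => p.2 == c)).map (·.1)

lemma pmIdx_index (l2 : List Char) (c : Char) :
    ((PySem.List.enumerate l2 0).foldl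
      (fun d p => d.modify p.2 [] (· ++ [p.1])) PySem.Dict.empty).getD c []
      = pmIdx l2 c := by
  have hswap : (PySem.List.enumerate l2 0).foldl
      (fun (d : PySem.Dict Char (List Int)) p => d.modify p.2 [] (· ++ [p.1])) PySem.Dict.empty
      = ((PySem.List.enumerate l2 0).map Prod.swap).foldl
        (fun d p => d.modify p.1 [] (· ++ [p.2])) PySem.Dict.empty := by
    rw [List.foldl_map]
    rfl
  rw [hswap, PySem.Dict.getD_foldl_modify_append]
  simp [pmIdx, List.filter_map, Function.comp_def]

lemma pmIdx_mem (l2 : List Char) (c : Char) (x : Int) :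
    x ∈ pmIdx l2 c ↔ ∃ (k : Nat) (h : k < l2.length), x = (k : Int) ∧ l2[k] = c := by
  simp only [pmIdx, List.mem_map, List.mem_filter, PySem.List.mem_enumerate_iff]
  constructor
  · rintro ⟨p, ⟨⟨k, hk, rfl⟩, hc⟩, rfl⟩
    simp only [beq_iff_eq] at hc
    exact ⟨k, hk, by simp, hc⟩
  · rintro ⟨k, hk, rfl, hc⟩
    exact ⟨((k : Int), l2[k]), ⟨⟨k, hk, by simp⟩, by simpa using hc⟩, rfl⟩

-- scatter: after setting 1 at each position of J (all in range), reading back at k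
lemma pmScatter_get? (J : List Int) (r : List Int) (k : Nat)
    (hJ : ∀ j ∈ J, 0 ≤ j ∧ j < (r.length : Int)) :
    (J.foldl (fun row j => PySem.List.pySetD row j 1) r)[k]?
      = if (k : Int) ∈ J then (if k < r.length then some 1 else none) else r[k]? := by
  induction J generalizing r with
  | nil => simp
  | cons j J ih =>
    obtain ⟨hj0, hjlt⟩ := hJ j (by simp)
    rw [List.foldl_cons, ih _ (by
      intro a ha
      have := hJ a (by simp [ha])
      simpa [PySem.List.length_pySetD] using this)]
    rw [PySem.List.pySetD_of_nonneg (h := hj0)]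
    by_cases hkJ : (k : Int) ∈ J
    · simp [hkJ, List.length_set]
    · by_cases hkj : (k : Int) = j
      · have hk : k = j.toNat := by omega
        subst hk
        simp [hkj, List.getElem?_set, List.length_set]
      · have : j.toNat ≠ k := by omega
        simp [hkJ, hkj, List.getElem?_set_ne this]

-- B's scatter over pmIdx builds exactly the comparison row
lemma pmB_row (l2 : List Char) (c : Char) :
    (pmIdx l2 c).foldl (fun row j => PySem.List.pySetD row j 1)
      (List.replicate l2.length (0 : Int))
      = l2.map (fun d => if c = d then (1 : Int) else 0) := by
  have hJ : ∀ j ∈ pmIdx l2 c, 0 ≤ j ∧ j < ((List.replicate l2.length (0:Int)).length : Int) := by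
    intro j hj
    rw [pmIdx_mem] at hj
    obtain ⟨k, hk, rfl, _⟩ := hj
    simp; omega
  apply List.ext_getElem?
  intro k
  rw [pmScatter_get? _ _ _ hJ]
  by_cases hk : k < l2.length
  · by_cases hmem : (k : Int) ∈ pmIdx l2 c
    · have := (pmIdx_mem l2 c k).mp hmem
      obtain ⟨k', hk', hkk, hc⟩ := this
      have : k' = k := by omega
      subst this
      simp [hmem, hk, hc]
    · have hne : l2[k] ≠ c := by
        intro h
        exact hmem ((pmIdx_mem l2 c k).mpr ⟨k, hk, rfl, h⟩)
      simp [hmem, hk]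
      intro h; exact absurd h.symm hne
  · simp [hk]

lemma pmB_eq_canon (seq1 seq2 : String) :
    point_matrix_alt seq1 seq2 = pmCanon seq1.toList seq2.toList := by
  unfold point_matrix_alt pmCanon
  simp only [pmIdx_index]
  have h1 : ∀ (m : List (List Int)) (c : Char),
      m ++ [(pmIdx seq2.toList c).foldl (fun row j => PySem.List.pySetD row j 1)
        (List.replicate seq2.toList.length (0 : Int))]
      = m ++ [seq2.toList.map (fun d => if c = d then (1:Int) else 0)] := by
    intro m c; rw [pmB_row]
  simp only [h1]
  rw [PySem.List.foldl_append_singleton_eq_map]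
  simp

-- ===== VERDICT (by name: the statement is the Claim_ definition above) =====
theorem point_matrix_spec : Claim_equal_point_matrix := by
  intro seq1 seq2 _
  unfold Spec_point_matrix
  rw [pmA_eq_canon, pmB_eq_canon]
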